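-- pv_equiv track=rewrite | github.com/Vignesh010101/Leetcode-Solutions-With-Python-Part-2 | 1562-people-whose-list-of-favorite-companies-is-not-a-subset-of-another-list/people-whose-list-of-favorite-companies-is-not-a-subset-of-another-list.py | peopleIndexes
-- ===== SOURCE A (Python) =====
-- from typing import List
--
-- def peopleIndexes(favoriteCompanies: List[List[str]]) -> List[int]:
--
--     answer: list = []
--     favoriteCompanies = [set(companies) for companies in favoriteCompanies]
--
--     for index, companies in enumerate(favoriteCompanies):
--         controller: bool = False
--         for others in favoriteCompanies:
--             if companies != others and others >= companies:
--                 controller = True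
--                 break
--
--         if not controller: answer.append(index)
--
--     answer.sort()
--     return answer
-- ===== SOURCE B (Python) =====
-- def peopleIndexes(favoriteCompanies):
--     sets = [set(cs) for cs in favoriteCompanies]
--     # inverted index: company -> set of people who list it
--     holders = {}
--     for j, cs in enumerate(favoriteCompanies):
--         for c in cs:
--             holders.setdefault(c, set()).add(j)
--     # a person with no companies is kept iff every list is empty
--     empty_ok = all(not s for s in sets)
--     answer = []
--     for i, cs in enumerate(favoriteCompanies):
--         if cs:
--             cand = holders.get(cs[0], set())
--             for c in cs[1:]:
--                 cand = cand & holders.get(c, set())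
--             keep = all(sets[j] == sets[i] for j in cand)
--         else:
--             keep = empty_ok
--         if keep:
--             answer.append(i)
--     return answer
-- ===== Notes on version B (the rewrite author's own statement) =====
-- stated objective: alternative
-- what changed: A compares every person's set against every other person's set with a subset test (all-pairs scan); B builds an inverted index from company to the set of people listing it, intersects the posting sets of a person's companies to obtain exactly the people whose lists contain all of them, and keeps the person iff every such candidate has an equal set (people with empty lists are kept iff all lists are empty).
import Mathlib
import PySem

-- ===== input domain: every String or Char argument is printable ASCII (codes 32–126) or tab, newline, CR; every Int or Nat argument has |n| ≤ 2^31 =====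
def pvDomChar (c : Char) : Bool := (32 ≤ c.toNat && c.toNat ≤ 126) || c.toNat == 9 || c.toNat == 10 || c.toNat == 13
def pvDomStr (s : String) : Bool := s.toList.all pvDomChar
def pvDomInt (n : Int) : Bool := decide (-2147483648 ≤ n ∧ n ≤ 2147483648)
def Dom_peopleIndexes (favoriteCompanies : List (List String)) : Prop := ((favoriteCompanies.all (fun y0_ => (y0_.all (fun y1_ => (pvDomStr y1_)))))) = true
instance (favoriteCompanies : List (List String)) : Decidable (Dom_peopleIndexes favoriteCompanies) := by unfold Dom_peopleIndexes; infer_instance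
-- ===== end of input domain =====

-- B replaces A's all-pairs subset scan by an inverted index company → people whose
-- posting sets are intersected to find each person's dominators (objective: alternative).

-- ===== PORT A =====
def peopleIndexes (favoriteCompanies : List (List String)) : List Int :=
  let sets : List (PySem.Set String) := favoriteCompanies.map (fun companies => PySem.Set.ofList companies)
  let answer : List Int :=
    (PySem.List.enumerate sets).foldl (fun answer p =>
      -- inner 'for others … break' loop: controller = any(...)
      let controller : Bool := sets.any (fun others =>
        !(PySem.Set.equal p.2 others) && PySem.Set.issuperset others p.2)
      if !controller then answer ++ [p.1] else answer) []
  PySem.List.sorted answer (fun x => x) false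

-- ===== PORT B =====
def peopleIndexes_alt (favoriteCompanies : List (List String)) : List Int :=
  let sets : List (PySem.Set String) := favoriteCompanies.map (fun cs => PySem.Set.ofList cs)
  -- inverted index: company -> set of people who list it
  let holders : PySem.Dict String (PySem.Set Int) :=
    (PySem.List.enumerate favoriteCompanies).foldl (fun d p =>
      p.2.foldl (fun d c => d.modify c [] (fun s => PySem.Set.add s p.1)) d) PySem.Dict.empty
  -- a person with no companies is kept iff every list is empty
  let emptyOk : Bool := sets.all (fun s => s.isEmpty)
  (PySem.List.enumerate favoriteCompanies).foldl (fun answer p =>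
    let keep : Bool :=
      match p.2 with
      | [] => emptyOk
      | c0 :: rest =>
        let cand : PySem.Set Int :=
          rest.foldl (fun cand c => PySem.Set.inter cand (holders.getD c []))
            (holders.getD c0 [])
        cand.all (fun j => PySem.Set.equal (PySem.List.pyGetD sets j [])
          (PySem.List.pyGetD sets p.1 []))
    if keep then answer ++ [p.1] else answer) []


-- ===== PRECONDITION & SPEC =====
def Spec_peopleIndexes (favoriteCompanies : List (List String)) (out : List Int) : Prop := out = peopleIndexes_alt favoriteCompanies
instance (favoriteCompanies : List (List String)) (out : List Int) : Decidable (Spec_peopleIndexes favoriteCompanies out) := by unfold Spec_peopleIndexes; infer_instance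

-- ===== CLAIM (what is proved, stated in full; the proofs are below) =====
def Claim_equal_peopleIndexes : Prop := ∀ (favoriteCompanies : List (List String)), Dom_peopleIndexes favoriteCompanies → Spec_peopleIndexes favoriteCompanies (peopleIndexes favoriteCompanies)

-- ===== LEMMAS AND PROOFS =====
theorem pv_enumerate_map {α β : Type} (g : α → β) (l : List α) (s : Int) :
    PySem.List.enumerate (l.map g) s = (PySem.List.enumerate l s).map (fun p => (p.1, g p.2)) := by
  induction l generalizing s with
  | nil => simp [PySem.List.enumerate_nil]
  | cons x xs ih => simp [PySem.List.enumerate_cons, ih]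

theorem pv_holdersInner_mem (cs : List String) (j x : Int) (c : String)
    (d : PySem.Dict String (PySem.Set Int)) :
    (x ∈ (cs.foldl (fun d c => d.modify c [] (fun s => PySem.Set.add s j)) d).getD c []) ↔
      x ∈ d.getD c [] ∨ (x = j ∧ c ∈ cs) := by
  induction cs generalizing d with
  | nil => simp
  | cons c' cs ih =>
    simp only [List.foldl_cons, ih, PySem.Dict.getD_modify, List.mem_cons]
    by_cases h : c = c'
    · subst h; simp [PySem.Set.mem_add]; tauto
    · simp [h]

theorem pv_holders_mem (l : List (Int × List String)) (d : PySem.Dict String (PySem.Set Int))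
    (c : String) (x : Int) :
    (x ∈ (l.foldl (fun d p => p.2.foldl (fun d c => d.modify c [] (fun s => PySem.Set.add s p.1)) d) d).getD c []) ↔
      x ∈ d.getD c [] ∨ ∃ p ∈ l, x = p.1 ∧ c ∈ p.2 := by
  induction l generalizing d with
  | nil => simp
  | cons p l ih =>
    simp only [List.foldl_cons, ih, pv_holdersInner_mem]
    constructor
    · rintro ((h|h)|⟨q,hq,h⟩)
      · exact Or.inl h
      · exact Or.inr ⟨p, List.mem_cons_self .., h⟩
      · exact Or.inr ⟨q, List.mem_cons_of_mem _ hq, h⟩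
    · rintro (h|⟨q,hq,h⟩)
      · exact Or.inl (Or.inl h)
      · rcases List.mem_cons.mp hq with rfl|hq
        · exact Or.inl (Or.inr h)
        · exact Or.inr ⟨q, hq, h⟩

theorem pv_cand_mem (cs : List String) (h : String → PySem.Set Int) (init : PySem.Set Int) (x : Int) :
    (x ∈ cs.foldl (fun cand c => PySem.Set.inter cand (h c)) init) ↔
      x ∈ init ∧ ∀ c ∈ cs, x ∈ h c := by
  induction cs generalizing init with
  | nil => simp
  | cons c cs ih =>
    simp only [List.foldl_cons, ih, PySem.Set.mem_inter]
    constructor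
    · rintro ⟨⟨h1,h2⟩,h3⟩
      exact ⟨h1, fun c' hc' => by rcases List.mem_cons.mp hc' with rfl|hc' <;> [exact h2; exact h3 c' hc']⟩
    · rintro ⟨h1,h2⟩
      exact ⟨⟨h1, h2 c (List.mem_cons_self ..)⟩, fun c' hc' => h2 c' (List.mem_cons_of_mem _ hc')⟩

-- j is in holders[c] (c one of person k's companies) iff j indexes a person whose list contains c
theorem pv_holders_char (fav : List (List String)) (c : String) (j : Int) :
    (j ∈ ((PySem.List.enumerate fav).foldl (fun d q =>
        q.2.foldl (fun d c => d.modify c [] (fun s => PySem.Set.add s q.1)) d)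
      PySem.Dict.empty).getD c []) ↔
      ∃ m : Nat, ∃ hm : m < fav.length, j = (m : Int) ∧ c ∈ fav[m] := by
  rw [pv_holders_mem]
  simp only [PySem.Dict.getD_empty, List.not_mem_nil, false_or]
  constructor
  · rintro ⟨q, hq, hq1, hq2⟩
    rw [PySem.List.mem_enumerate_iff] at hq
    obtain ⟨m, hm, rfl⟩ := hq
    exact ⟨m, hm, by simpa using hq1, hq2⟩
  · rintro ⟨m, hm, rfl, hc⟩
    refine ⟨((0 : Int) + (m : Nat), fav[m]'hm), ?_, by simp, hc⟩
    rw [PySem.List.mem_enumerate_iff]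
    exact ⟨m, hm, rfl⟩

theorem pv_point (fav : List (List String)) (x : Int × List String)
    (hx : x ∈ PySem.List.enumerate fav) :
    (!(List.map (fun companies => PySem.Set.ofList companies) fav).any fun others =>
        !(PySem.Set.ofList x.2).equal others && others.issuperset (PySem.Set.ofList x.2))
    = (match x.2 with
       | [] => (fav.map (fun companies => PySem.Set.ofList companies)).all (fun s => s.isEmpty)
       | c0 :: rest =>
         (rest.foldl (fun cand c => PySem.Set.inter cand
             (((PySem.List.enumerate fav).foldl (fun d q =>
                 q.2.foldl (fun d c => d.modify c [] (fun s => PySem.Set.add s q.1)) d)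
               PySem.Dict.empty).getD c []))
           (((PySem.List.enumerate fav).foldl (fun d q =>
               q.2.foldl (fun d c => d.modify c [] (fun s => PySem.Set.add s q.1)) d)
             PySem.Dict.empty).getD c0 [])).all
           (fun j => PySem.Set.equal
             (PySem.List.pyGetD (fav.map fun companies => PySem.Set.ofList companies) j [])
             (PySem.List.pyGetD (fav.map fun companies => PySem.Set.ofList companies) x.1 []))) := by
  rw [PySem.List.mem_enumerate_iff] at hx
  obtain ⟨k, hk, rfl⟩ := hx
  have hk' : k < (fav.map fun companies => PySem.Set.ofList companies).length := by
    simpa using hk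
  have hxk : PySem.List.pyGetD (fav.map fun companies => PySem.Set.ofList companies)
      ((0 : Int) + (k : Nat), fav[k]).1 [] = PySem.Set.ofList fav[k] := by
    simp only [zero_add]
    rw [PySem.List.pyGetD_natCast, List.getD_eq_getElem _ _ hk']
    simp
  rcases hL : (((0 : Int) + (k : Nat), fav[k]).2) with _ | ⟨c0, rest⟩
  · -- person k has no companies: kept iff every set is empty
    simp only [hL]
    rw [Bool.eq_iff_iff, Bool.not_eq_true', List.any_eq_false, List.all_eq_true]
    constructor
    · intro H s hs
      have hf := H s hs
      have hsup : s.issuperset (PySem.Set.ofList ([] : List String)) = true := by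
        rw [PySem.Set.issuperset_iff]; intro c hc; simp at hc
      rw [hsup, Bool.and_true] at hf
      have heq : (PySem.Set.ofList ([] : List String)).equal s = true := by simpa using hf
      rw [PySem.Set.equal_iff] at heq
      rw [List.isEmpty_iff, List.eq_nil_iff_forall_not_mem]
      intro y hy
      exact (by simpa using (heq y).mpr hy : False)
    · intro H s hs
      have hse : s = [] := List.isEmpty_iff.mp (H s hs)
      subst hse
      simp
  · -- person k has companies c0 :: rest
    have hL2 : fav[k] = c0 :: rest := by simpa using hL
    simp only [hL]
    rw [← hL2]
    rw [Bool.eq_iff_iff]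
    constructor
    · intro H
      rw [List.all_eq_true]
      intro j hj
      rw [pv_cand_mem] at hj
      obtain ⟨hj0, hjrest⟩ := hj
      have hmemall : ∀ c ∈ fav[k], j ∈ ((PySem.List.enumerate fav).foldl (fun d q =>
          q.2.foldl (fun d c => d.modify c [] (fun s => PySem.Set.add s q.1)) d)
        PySem.Dict.empty).getD c [] := by
        intro c hc
        rw [hL2] at hc
        rcases List.mem_cons.mp hc with rfl | hc
        · exact hj0
        · exact hjrest c hc
      obtain ⟨m0, hm0, hjm0, _⟩ := (pv_holders_char fav c0 j).mp hj0
      have hjlen : j.toNat < fav.length := by omega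
      have hjcast : ((j.toNat : Nat) : Int) = j := by omega
      have hj' : j.toNat < (fav.map fun companies => PySem.Set.ofList companies).length := by
        simpa using hjlen
      have hmem : ∀ c ∈ fav[k], c ∈ PySem.Set.ofList (fav[j.toNat]'hjlen) := by
        intro c hc
        obtain ⟨m, hm, hjm, hcm⟩ := (pv_holders_char fav c j).mp (hmemall c hc)
        have hmj : m = j.toNat := by omega
        subst hmj
        simpa [PySem.Set.mem_ofList] using hcm
      rw [Bool.not_eq_true', List.any_eq_false] at H
      have hs : PySem.Set.ofList (fav[j.toNat]'hjlen) ∈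
          (List.map (fun companies => PySem.Set.ofList companies) fav) :=
        List.mem_map.mpr ⟨fav[j.toNat]'hjlen, List.getElem_mem _, rfl⟩
      have hsuptrue : (PySem.Set.ofList (fav[j.toNat]'hjlen)).issuperset
          (PySem.Set.ofList fav[k]) = true := by
        rw [PySem.Set.issuperset_iff]
        intro c hc
        exact hmem c (by simpa [PySem.Set.mem_ofList] using hc)
      have hf := H _ hs
      rw [hsuptrue, Bool.and_true] at hf
      have hf2 : (PySem.Set.ofList fav[k]).equal
          (PySem.Set.ofList (fav[j.toNat]'hjlen)) = true := by simpa using hf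
      rw [hxk, ← hjcast, PySem.List.pyGetD_natCast, List.getD_eq_getElem _ _ hj']
      simp only [List.getElem_map]
      rw [PySem.Set.equal_iff] at hf2 ⊢
      intro y; exact (hf2 y).symm
    · intro H
      rw [Bool.not_eq_true', List.any_eq_false]
      intro s hs
      obtain ⟨cs, hcs, rfl⟩ := List.mem_map.mp hs
      obtain ⟨m, hm, rfl⟩ := List.mem_iff_getElem.mp hcs
      by_cases hsup : (PySem.Set.ofList (fav[m]'hm)).issuperset (PySem.Set.ofList fav[k]) = true
      · rw [List.all_eq_true] at H
        have hall : ∀ c ∈ fav[k], ((m : Nat) : Int) ∈ ((PySem.List.enumerate fav).foldl (fun d q =>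
            q.2.foldl (fun d c => d.modify c [] (fun s => PySem.Set.add s q.1)) d)
          PySem.Dict.empty).getD c [] := by
          intro c hc
          rw [pv_holders_char]
          refine ⟨m, hm, rfl, ?_⟩
          rw [PySem.Set.issuperset_iff] at hsup
          have hcm := hsup c (by simpa [PySem.Set.mem_ofList] using hc)
          simpa [PySem.Set.mem_ofList] using hcm
        have hmc : ((m : Nat) : Int) ∈ (rest.foldl (fun cand c => PySem.Set.inter cand
            (((PySem.List.enumerate fav).foldl (fun d q =>
                q.2.foldl (fun d c => d.modify c [] (fun s => PySem.Set.add s q.1)) d)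
              PySem.Dict.empty).getD c []))
            (((PySem.List.enumerate fav).foldl (fun d q =>
                q.2.foldl (fun d c => d.modify c [] (fun s => PySem.Set.add s q.1)) d)
              PySem.Dict.empty).getD c0 [])) := by
          rw [pv_cand_mem]
          constructor
          · exact hall c0 (by rw [hL2]; exact List.mem_cons_self ..)
          · intro c hc
            exact hall c (by rw [hL2]; exact List.mem_cons_of_mem _ hc)
        have hq := H _ hmc
        rw [hxk] at hq
        have hm' : m < (fav.map fun companies => PySem.Set.ofList companies).length := by
          simpa using hm
        rw [PySem.List.pyGetD_natCast, List.getD_eq_getElem _ _ hm'] at hq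
        simp only [List.getElem_map] at hq
        have heq : (PySem.Set.ofList fav[k]).equal (PySem.Set.ofList (fav[m]'hm)) = true := by
          rw [PySem.Set.equal_iff] at hq ⊢
          intro y; exact (hq y).symm
        rw [heq]
        simp
      · have hfalse : (PySem.Set.ofList (fav[m]'hm)).issuperset (PySem.Set.ofList fav[k]) = false :=
          Bool.eq_false_iff.mpr hsup
        rw [hfalse]
        simp

theorem pv_main (fav : List (List String)) : peopleIndexes fav = peopleIndexes_alt fav := by
  simp only [peopleIndexes, peopleIndexes_alt]
  rw [PySem.List.foldl_append_if
      (p := fun p : Int × PySem.Set String =>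
        !((fav.map fun companies => PySem.Set.ofList companies).any fun others =>
          !(PySem.Set.equal p.2 others) && PySem.Set.issuperset others p.2))
      (f := fun p : Int × PySem.Set String => p.1)]
  rw [PySem.List.foldl_append_if
      (p := fun p : Int × List String =>
        (match p.2 with
         | [] => (fav.map (fun cs => PySem.Set.ofList cs)).all (fun s => s.isEmpty)
         | c0 :: rest =>
           (rest.foldl (fun cand c => PySem.Set.inter cand
               (((PySem.List.enumerate fav).foldl (fun d q =>
                   q.2.foldl (fun d c => d.modify c [] (fun s => PySem.Set.add s q.1)) d)
                 PySem.Dict.empty).getD c []))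
             (((PySem.List.enumerate fav).foldl (fun d q =>
                 q.2.foldl (fun d c => d.modify c [] (fun s => PySem.Set.add s q.1)) d)
               PySem.Dict.empty).getD c0 [])).all
             (fun j => PySem.Set.equal
               (PySem.List.pyGetD (fav.map fun cs => PySem.Set.ofList cs) j [])
               (PySem.List.pyGetD (fav.map fun cs => PySem.Set.ofList cs) p.1 []))))
      (f := fun p : Int × List String => p.1)]
  simp only [List.nil_append, pv_enumerate_map]
  rw [List.filter_map, List.map_map]
  simp only [Function.comp_def]
  rw [List.filter_congr (pv_point fav)]
  apply PySem.List.sorted_eq_self_of_pairwise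
  rw [List.pairwise_map]
  exact ((PySem.List.pairwise_lt_enumerate fav 0).filter _).imp (fun h => le_of_lt h)

-- ===== VERDICT (by name: the statement is the Claim_ definition above) =====
theorem peopleIndexes_spec : Claim_equal_peopleIndexes := by
  intro fav _hdom
  exact pv_main fav
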